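-- pv_equiv track=rewrite | github.com/dfgloup/DM_lab | PDA.py | pda_function
-- ===== SOURCE A (Python) =====
-- from typing import List
--
-- def pda_function(s: str) -> bool:
--     state = 'q0'
--     stack: List[str] = []
--
--     for ch in s:
--         if state == 'q0':
--             if ch == 'a':
--                 stack.append('A')
--             elif ch == 'b':
--                 if not stack:
--                     return False
--                 stack.pop()
--                 state = 'q1'
--             else:
--                 return False
--
--         elif state == 'q1':
--             if ch == 'b':
--                 if not stack:
--                     return False
--                 stack.pop()
--             else:
--                 return False
--
--     return len(stack) == 0
-- ===== SOURCE B (Python) =====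
-- def pda_function(s: str) -> bool:
--     n = 0
--     while n < len(s) and s[n] == 'a':
--         n += 1
--     return s[n:] == 'b' * n
-- ===== Notes on version B (the rewrite author's own statement) =====
-- stated objective: simpler
-- what changed: Replaces the state/stack PDA simulation with counting the leading run of 'a' and comparing the remainder to 'b' repeated that many times.
import Mathlib
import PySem

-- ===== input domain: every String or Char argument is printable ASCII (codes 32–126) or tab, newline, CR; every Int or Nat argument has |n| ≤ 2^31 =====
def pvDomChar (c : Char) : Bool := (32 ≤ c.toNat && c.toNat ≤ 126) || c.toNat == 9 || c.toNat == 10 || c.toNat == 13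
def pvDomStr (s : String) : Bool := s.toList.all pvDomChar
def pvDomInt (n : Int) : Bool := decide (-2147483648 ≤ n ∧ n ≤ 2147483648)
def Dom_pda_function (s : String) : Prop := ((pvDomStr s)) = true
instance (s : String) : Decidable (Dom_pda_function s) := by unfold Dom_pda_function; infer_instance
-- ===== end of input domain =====

-- B replaces the state/stack PDA simulation with a leading-'a' count and a suffix comparison against 'b' repeated (objective: simpler).

-- ===== PORT A =====
-- the for-loop of A: recursion over the characters, carrying state and stack
def pdaLoop : List Char → String → List String → Bool
  | [], _, stack => stack.length == 0
  | ch :: rest, state, stack =>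
    if state == "q0" then
      if ch == 'a' then pdaLoop rest state (stack ++ ["A"])
      else if ch == 'b' then
        if stack.isEmpty then false
        else pdaLoop rest "q1" stack.dropLast
      else false
    else
      if ch == 'b' then
        if stack.isEmpty then false
        else pdaLoop rest state stack.dropLast
      else false

def pda_function (s : String) : Bool := pdaLoop s.toList "q0" []

-- ===== PORT B =====
-- the while-loop of Source B: count of leading 'a' characters
def countA : List Char → Nat
  | [] => 0
  | c :: r => if c == 'a' then countA r + 1 else 0

def pda_function_alt (s : String) : Bool :=
  let l := s.toList
  let n := countA l
  l.drop n == List.replicate n 'b'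

-- ===== PRECONDITION & SPEC =====
def Spec_pda_function (s : String) (out : Bool) : Prop := out = pda_function_alt s
instance (s : String) (out : Bool) : Decidable (Spec_pda_function s out) := by unfold Spec_pda_function; infer_instance

-- ===== CLAIM (what is proved, stated in full; the proofs are below) =====
def Claim_equal_pda_function : Prop := ∀ (s : String), Dom_pda_function s → Spec_pda_function s (pda_function s)

-- ===== LEMMAS AND PROOFS =====

-- in state q1 the loop accepts exactly a run of 'b' of the stack's length
lemma pdaLoop_q1 (l : List Char) : ∀ (stack : List String),
    pdaLoop l "q1" stack = (l == List.replicate stack.length 'b') := by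
  induction l with
  | nil =>
    intro stack
    simp [pdaLoop]
    cases stack <;> simp
  | cons ch rest ih =>
    intro stack
    by_cases hb : ch = 'b'
    · subst hb
      cases stack with
      | nil => simp [pdaLoop]
      | cons x xs =>
        simp [pdaLoop, ih, List.replicate_succ]
    · simp only [pdaLoop]
      norm_num [hb]
      cases stack with
      | nil => simp
      | cons x xs => simp [List.replicate_succ, hb]

-- in state q0 the loop accepts exactly (remaining a's) then b's matching count + stack
lemma pdaLoop_q0 (l : List Char) : ∀ (stack : List String),
    pdaLoop l "q0" stack
      = (l.drop (countA l) == List.replicate (countA l + stack.length) 'b') := by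
  induction l with
  | nil =>
    intro stack
    simp [pdaLoop, countA]
    cases stack <;> simp
  | cons ch rest ih =>
    intro stack
    by_cases ha : ch = 'a'
    · subst ha
      simp only [pdaLoop, countA]
      norm_num [ih (stack ++ ["A"])]
      have : countA rest + (stack.length + 1) = countA rest + 1 + stack.length := by omega
      rw [this]
    · by_cases hb : ch = 'b'
      · subst hb
        simp only [pdaLoop, countA]
        norm_num
        cases stack with
        | nil => simp
        | cons x xs =>
          rw [pdaLoop_q1]
          simp [List.replicate_succ]
      · simp only [pdaLoop, countA]
        norm_num [ha, hb]
        cases stack with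
        | nil => simp
        | cons x xs => simp [List.replicate_succ, hb]

-- ===== VERDICT (by name: the statement is the Claim_ definition above) =====
theorem pda_function_spec : Claim_equal_pda_function := by
  intro s _
  unfold Spec_pda_function pda_function pda_function_alt
  rw [pdaLoop_q0]
  simp
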